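-- pv_equiv track=rewrite | github.com/SJTU-xihe/multi-player-game-ai-project | agents/ai_bots/gomoku_minimax_bot.py | _line_has_live_three
-- ===== SOURCE A (Python) =====
-- def _line_has_live_three(line, player, target_row_offset, target_col_offset, dr, dc):
--     """检查线段是否包含活三，并且目标位置能够阻断它"""
--     # 计算目标位置在线段中的索引
--     if dr == 0 and dc == 1:  # 水平
--         target_idx = target_col_offset
--     elif dr == 1 and dc == 0:  # 垂直
--         target_idx = target_row_offset
--     elif dr == 1 and dc == 1:  # 主对角线
--         target_idx = target_row_offset
--     elif dr == 1 and dc == -1:  # 副对角线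
--         target_idx = target_row_offset
--     else:
--         target_idx = -1
--
--     if target_idx < 0 or target_idx >= len(line):
--         return False
--
--     # 标准化线段：对手棋子=1，空位=0，自己的棋子=-1
--     normalized = []
--     for cell in line:
--         if cell == player:
--             normalized.append(-1)
--         elif cell == 0:
--             normalized.append(0)
--         else:
--             normalized.append(1)
--
--     # 检查标准活三模式 [0,1,1,1,0]
--     for i in range(len(normalized) - 4):
--         if normalized[i:i+5] == [0, -1, -1, -1, 0]:
--             # 检查目标位置是否在活三的空位上
--             if target_idx == i or target_idx == i + 4:
--                 return True
--
--     # 检查跳跃活三模式 [0,1,0,1,1,0]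
--     for i in range(len(normalized) - 5):
--         if normalized[i:i+6] == [0, -1, 0, -1, -1, 0]:
--             # 检查目标位置是否在关键空位上
--             if target_idx == i or target_idx == i + 2 or target_idx == i + 5:
--                 return True
--
--     # 检查另一种跳跃活三 [0,1,1,0,1,0]
--     for i in range(len(normalized) - 5):
--         if normalized[i:i+6] == [0, -1, -1, 0, -1, 0]:
--             if target_idx == i or target_idx == i + 3 or target_idx == i + 5:
--                 return True
--
--     return False
-- ===== SOURCE B (Python) =====
-- def _line_has_live_three(line, player, target_row_offset, target_col_offset, dr, dc):
--     """Anchored check: instead of normalizing the whole line and scanning every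
--     window, test only the few windows in which target_idx is one of the
--     pattern's blockable empty slots, normalizing just those windows."""
--     if dr == 0 and dc == 1:
--         t = target_col_offset
--     elif (dr, dc) in ((1, 0), (1, 1), (1, -1)):
--         t = target_row_offset
--     else:
--         t = -1
--     n = len(line)
--     if not (0 <= t < n):
--         return False
--
--     def matches(start, pat):
--         L = len(pat)
--         return (0 <= start and start + L <= n
--                 and [-1 if c == player else (0 if c == 0 else 1)
--                      for c in line[start:start + L]] == pat)
--
--     open3 = [0, -1, -1, -1, 0]
--     jump_a = [0, -1, 0, -1, -1, 0]
--     jump_b = [0, -1, -1, 0, -1, 0]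
--     return (any(matches(t - off, open3) for off in (0, 4))
--             or any(matches(t - off, jump_a) for off in (0, 2, 5))
--             or any(matches(t - off, jump_b) for off in (0, 3, 5)))
-- ===== Notes on version B (the rewrite author's own statement) =====
-- stated objective: alternative
-- what changed: B anchors every pattern check on target_idx, normalizing and comparing at most 8 fixed-length windows whose start is solved from the pattern's empty-slot offsets, instead of A's full normalization pass followed by a scan over all windows of the line.
import Mathlib
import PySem

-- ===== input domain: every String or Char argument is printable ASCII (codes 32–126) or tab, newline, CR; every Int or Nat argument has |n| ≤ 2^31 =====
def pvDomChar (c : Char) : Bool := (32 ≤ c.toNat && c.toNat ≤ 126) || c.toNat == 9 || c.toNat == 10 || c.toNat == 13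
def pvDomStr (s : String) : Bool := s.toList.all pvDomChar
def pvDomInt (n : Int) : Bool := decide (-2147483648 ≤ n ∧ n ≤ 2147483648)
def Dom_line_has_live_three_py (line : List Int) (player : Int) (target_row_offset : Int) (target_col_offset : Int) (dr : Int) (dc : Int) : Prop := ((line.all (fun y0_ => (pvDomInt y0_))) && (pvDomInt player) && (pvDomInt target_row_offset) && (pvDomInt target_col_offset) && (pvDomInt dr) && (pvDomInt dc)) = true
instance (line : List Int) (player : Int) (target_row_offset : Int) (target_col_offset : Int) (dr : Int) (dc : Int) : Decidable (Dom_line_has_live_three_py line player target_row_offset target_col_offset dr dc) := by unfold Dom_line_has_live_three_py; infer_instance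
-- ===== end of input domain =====

-- B anchors every pattern check on target_idx (at most 8 fixed windows, normalized locally) instead of normalizing the whole line and scanning all windows; objective: alternative.


-- ===== PORT A =====
-- normalization loop: opponent→1, empty→0, self→-1 (shared shape by both Pythons)
def pvNormalize (line : List Int) (player : Int) : List Int :=
  line.map (fun cell => if cell = player then -1 else if cell = 0 then 0 else 1)

def pvTargetIdx (target_row_offset : Int) (target_col_offset : Int) (dr : Int) (dc : Int) : Int :=
  if dr = 0 ∧ dc = 1 then target_col_offset
  else if dr = 1 ∧ dc = 0 then target_row_offset
  else if dr = 1 ∧ dc = 1 then target_row_offset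
  else if dr = 1 ∧ dc = -1 then target_row_offset
  else -1

def line_has_live_three_py (line : List Int) (player : Int) (target_row_offset : Int) (target_col_offset : Int) (dr : Int) (dc : Int) : Bool :=
  let t := pvTargetIdx target_row_offset target_col_offset dr dc
  if t < 0 ∨ t ≥ (line.length : Int) then false
  else
    let normalized := pvNormalize line player
    let n : Int := (normalized.length : Int)
    ((PySem.List.pyRange 0 (n - 4) 1).any (fun i =>
        (PySem.List.slice normalized (some i) (some (i + 5)) == ([0, -1, -1, -1, 0] : List Int))
        && (t == i || t == i + 4)))
    || ((PySem.List.pyRange 0 (n - 5) 1).any (fun i =>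
        (PySem.List.slice normalized (some i) (some (i + 6)) == ([0, -1, 0, -1, -1, 0] : List Int))
        && (t == i || t == i + 2 || t == i + 5)))
    || ((PySem.List.pyRange 0 (n - 5) 1).any (fun i =>
        (PySem.List.slice normalized (some i) (some (i + 6)) == ([0, -1, -1, 0, -1, 0] : List Int))
        && (t == i || t == i + 3 || t == i + 5)))

-- ===== PORT B =====
def pvMatches (line : List Int) (player : Int) (n start : Int) (pat : List Int) : Bool :=
  decide (0 ≤ start) && decide (start + (pat.length : Int) ≤ n)
  && ((PySem.List.slice line (some start) (some (start + (pat.length : Int)))).map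
        (fun cell => if cell = player then -1 else if cell = 0 then 0 else 1) == pat)

def line_has_live_three_py_alt (line : List Int) (player : Int) (target_row_offset : Int) (target_col_offset : Int) (dr : Int) (dc : Int) : Bool :=
  let t := pvTargetIdx target_row_offset target_col_offset dr dc
  let n : Int := (line.length : Int)
  if ¬ (0 ≤ t ∧ t < n) then false
  else
    (([0, 4] : List Int).any (fun off => pvMatches line player n (t - off) [0, -1, -1, -1, 0]))
    || (([0, 2, 5] : List Int).any (fun off => pvMatches line player n (t - off) [0, -1, 0, -1, -1, 0]))
    || (([0, 3, 5] : List Int).any (fun off => pvMatches line player n (t - off) [0, -1, -1, 0, -1, 0]))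

-- ===== PRECONDITION & SPEC =====
def Spec_line_has_live_three_py (line : List Int) (player : Int) (target_row_offset : Int) (target_col_offset : Int) (dr : Int) (dc : Int) (out : Bool) : Prop := out = line_has_live_three_py_alt line player target_row_offset target_col_offset dr dc
instance (line : List Int) (player : Int) (target_row_offset : Int) (target_col_offset : Int) (dr : Int) (dc : Int) (out : Bool) : Decidable (Spec_line_has_live_three_py line player target_row_offset target_col_offset dr dc out) := by unfold Spec_line_has_live_three_py; infer_instance

-- ===== CLAIM (what is proved, stated in full; the proofs are below) =====
def Claim_equal_line_has_live_three_py : Prop := ∀ (line : List Int) (player : Int) (target_row_offset : Int) (target_col_offset : Int) (dr : Int) (dc : Int), Dom_line_has_live_three_py line player target_row_offset target_col_offset dr dc → Spec_line_has_live_three_py line player target_row_offset target_col_offset dr dc (line_has_live_three_py line player target_row_offset target_col_offset dr dc)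

-- ===== LEMMAS AND PROOFS =====


theorem pv_map_slice {a b : Int} (xs : List Int) (f : Int → Int) :
    (PySem.List.slice xs (some a) (some b)).map f = PySem.List.slice (xs.map f) (some a) (some b) := by
  simp [PySem.List.slice, List.map_drop, List.map_take]

theorem line_has_live_three_main (line : List Int) (player t : Int) :
    (((PySem.List.pyRange 0 (((pvNormalize line player).length : Int) - 4) 1).any (fun i =>
        (PySem.List.slice (pvNormalize line player) (some i) (some (i + 5)) == ([0, -1, -1, -1, 0] : List Int))
        && (t == i || t == i + 4)))
    || ((PySem.List.pyRange 0 (((pvNormalize line player).length : Int) - 5) 1).any (fun i =>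
        (PySem.List.slice (pvNormalize line player) (some i) (some (i + 6)) == ([0, -1, 0, -1, -1, 0] : List Int))
        && (t == i || t == i + 2 || t == i + 5)))
    || ((PySem.List.pyRange 0 (((pvNormalize line player).length : Int) - 5) 1).any (fun i =>
        (PySem.List.slice (pvNormalize line player) (some i) (some (i + 6)) == ([0, -1, -1, 0, -1, 0] : List Int))
        && (t == i || t == i + 3 || t == i + 5))))
    = ((([0, 4] : List Int).any (fun off => pvMatches line player (line.length : Int) (t - off) [0, -1, -1, -1, 0]))
    || (([0, 2, 5] : List Int).any (fun off => pvMatches line player (line.length : Int) (t - off) [0, -1, 0, -1, -1, 0]))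
    || (([0, 3, 5] : List Int).any (fun off => pvMatches line player (line.length : Int) (t - off) [0, -1, -1, 0, -1, 0]))) := by
  rw [Bool.eq_iff_iff]
  simp [List.any_eq_true, PySem.List.mem_pyRange_one, Bool.and_eq_true, Bool.or_eq_true,
    beq_iff_eq, decide_eq_true_eq, pvMatches, sub_zero, pv_map_slice, pvNormalize]
  constructor
  · rintro ((⟨x, ⟨h0, h1⟩, hs, ht⟩ | ⟨x, ⟨h0, h1⟩, hs, ht⟩) | ⟨x, ⟨h0, h1⟩, hs, ht⟩)
    · rcases ht with rfl | ht
      · exact Or.inl (Or.inl (Or.inl ⟨⟨h0, by omega⟩, hs⟩))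
      · have hx : x = t - 4 := by omega
        subst hx
        exact Or.inl (Or.inl (Or.inr ⟨⟨by omega, by omega⟩, hs⟩))
    · rcases ht with (rfl | ht) | ht
      · exact Or.inl (Or.inr (Or.inl ⟨⟨h0, by omega⟩, hs⟩))
      · have hx : x = t - 2 := by omega
        subst hx
        exact Or.inl (Or.inr (Or.inr (Or.inl ⟨⟨by omega, by omega⟩, hs⟩)))
      · have hx : x = t - 5 := by omega
        subst hx
        exact Or.inl (Or.inr (Or.inr (Or.inr ⟨⟨by omega, by omega⟩, hs⟩)))
    · rcases ht with (rfl | ht) | ht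
      · exact Or.inr (Or.inl ⟨⟨h0, by omega⟩, hs⟩)
      · have hx : x = t - 3 := by omega
        subst hx
        exact Or.inr (Or.inr (Or.inl ⟨⟨by omega, by omega⟩, hs⟩))
      · have hx : x = t - 5 := by omega
        subst hx
        exact Or.inr (Or.inr (Or.inr ⟨⟨by omega, by omega⟩, hs⟩))
  · rintro (((⟨⟨h0, h1⟩, hs⟩ | ⟨⟨h0, h1⟩, hs⟩) |
        (⟨⟨h0, h1⟩, hs⟩ | ⟨⟨h0, h1⟩, hs⟩ | ⟨⟨h0, h1⟩, hs⟩)) |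
        (⟨⟨h0, h1⟩, hs⟩ | ⟨⟨h0, h1⟩, hs⟩ | ⟨⟨h0, h1⟩, hs⟩))
    · exact Or.inl (Or.inl ⟨t, ⟨h0, by omega⟩, hs, by omega⟩)
    · exact Or.inl (Or.inl ⟨t - 4, ⟨by omega, by omega⟩, hs, by omega⟩)
    · exact Or.inl (Or.inr ⟨t, ⟨h0, by omega⟩, hs, by omega⟩)
    · exact Or.inl (Or.inr ⟨t - 2, ⟨by omega, by omega⟩, hs, by omega⟩)
    · exact Or.inl (Or.inr ⟨t - 5, ⟨by omega, by omega⟩, hs, by omega⟩)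
    · exact Or.inr ⟨t, ⟨h0, by omega⟩, hs, by omega⟩
    · exact Or.inr ⟨t - 3, ⟨by omega, by omega⟩, hs, by omega⟩
    · exact Or.inr ⟨t - 5, ⟨by omega, by omega⟩, hs, by omega⟩

-- ===== VERDICT (by name: the statement is the Claim_ definition above) =====
theorem line_has_live_three_py_spec : Claim_equal_line_has_live_three_py := by
  intro line player tro tco dr dc _
  unfold Spec_line_has_live_three_py line_has_live_three_py line_has_live_three_py_alt
  simp only []
  by_cases h : pvTargetIdx tro tco dr dc < 0 ∨ pvTargetIdx tro tco dr dc ≥ (line.length : Int)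
  · rw [if_pos h, if_pos (show ¬ (0 ≤ pvTargetIdx tro tco dr dc ∧ pvTargetIdx tro tco dr dc < ((line.length : Int))) by omega)]
  · rw [if_neg h, if_neg (not_not.mpr (by omega))]
    exact line_has_live_three_main line player (pvTargetIdx tro tco dr dc)
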